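-- pv_equiv track=rewrite | github.com/n-k-t/dmap | tensor-lattice/memory.py | check_contiguous
-- ===== SOURCE A (Python) =====
-- def check_contiguous(
--         stride: list[int],
--         view: list[int]
--     ) -> bool:
--     if not stride[-1] == 1:
--         return False
--     if not all((stride[i - 1] == (stride[i] * view[i])) for i in range(len(stride) - 1, 0, -1)):
--         return False
--     return True
-- ===== SOURCE B (Python) =====
-- def check_contiguous(
--         stride: list[int],
--         view: list[int]
--     ) -> bool:
--     # Single backward scan comparing each stride against the canonical
--     # contiguous stride (running product of trailing view dimensions).
--     expected = 1
--     for i in range(len(stride) - 1, -1, -1):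
--         if stride[i] != expected:
--             return False
--         if i > 0:
--             expected *= view[i]
--     return True
-- ===== Notes on version B (the rewrite author's own statement) =====
-- stated objective: alternative
-- what changed: Instead of A's two-stage check (trailing stride == 1, then all adjacent pairs satisfy stride[i-1] == stride[i]*view[i]), B does one backward scan maintaining the running product of trailing view dimensions and compares each stride entry against that canonical contiguous stride.
import Mathlib
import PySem

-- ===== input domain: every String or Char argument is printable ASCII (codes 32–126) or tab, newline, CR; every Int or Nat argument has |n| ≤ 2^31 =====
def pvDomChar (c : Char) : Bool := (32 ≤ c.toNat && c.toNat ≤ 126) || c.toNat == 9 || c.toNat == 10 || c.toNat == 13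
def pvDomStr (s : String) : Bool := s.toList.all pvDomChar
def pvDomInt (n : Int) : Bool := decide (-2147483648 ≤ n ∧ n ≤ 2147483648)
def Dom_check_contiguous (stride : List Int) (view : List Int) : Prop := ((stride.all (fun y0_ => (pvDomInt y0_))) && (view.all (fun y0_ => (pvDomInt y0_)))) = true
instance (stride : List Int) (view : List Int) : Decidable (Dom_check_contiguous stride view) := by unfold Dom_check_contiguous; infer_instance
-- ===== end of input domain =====

-- B replaces A's neighbour-to-neighbour stride comparison with a single backward scan
-- against a running product of trailing view dimensions (the canonical contiguous stride);
-- objective: simpler/alternative decomposition, same cost.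

-- ===== PORT A =====
-- stride[-1]; out-of-range (stride = []) is an IndexError in Python, excluded by Pre_.
def check_contiguous (stride : List Int) (view : List Int) : Bool :=
  if !(PySem.List.pyGetD stride (-1) 0 == 1) then false
  else if !((PySem.List.pyRange ((stride.length : Int) - 1) 0 (-1)).all (fun i =>
      PySem.List.pyGetD stride (i - 1) 0 ==
        PySem.List.pyGetD stride i 0 * PySem.List.pyGetD view i 0)) then false
  else true

-- ===== PORT B =====
-- the for-loop of Source B with its early `return False`, over range(len(stride)-1, -1, -1)
def checkContiguousAltGo (stride : List Int) (view : List Int) : List Int → Int → Bool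
  | [], _ => true
  | i :: rest, expected =>
    if PySem.List.pyGetD stride i 0 != expected then false
    else checkContiguousAltGo stride view rest
      (if 0 < i then expected * PySem.List.pyGetD view i 0 else expected)

def check_contiguous_alt (stride : List Int) (view : List Int) : Bool :=
  checkContiguousAltGo stride view
    (PySem.List.pyRange ((stride.length : Int) - 1) (-1) (-1)) 1

-- ===== PRECONDITION & SPEC =====
-- Pre_ excludes exactly the inputs where Python A raises IndexError: an empty stride
-- (stride[-1]), and a trailing stride of 1 with view shorter than stride (view[len(stride)-1]).
def Pre_check_contiguous (stride : List Int) (view : List Int) : Prop :=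
  stride ≠ [] ∧ (stride.getLast? = some 1 ∧ 2 ≤ stride.length → stride.length ≤ view.length)
instance (stride : List Int) (view : List Int) : Decidable (Pre_check_contiguous stride view) := by
  unfold Pre_check_contiguous; infer_instance
def pvWitness_check_contiguous : List Int × List Int := ([6, 3, 1], [2, 2, 3])

def Spec_check_contiguous (stride : List Int) (view : List Int) (out : Bool) : Prop := out = check_contiguous_alt stride view
instance (stride : List Int) (view : List Int) (out : Bool) : Decidable (Spec_check_contiguous stride view out) := by unfold Spec_check_contiguous; infer_instance

-- ===== CLAIM (what is proved, stated in full; the proofs are below) =====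
def Claim_equal_check_contiguous : Prop := ∀ (stride : List Int) (view : List Int), Dom_check_contiguous stride view → Pre_check_contiguous stride view → Spec_check_contiguous stride view (check_contiguous stride view)

-- ===== LEMMAS AND PROOFS =====

-- B's loop over [k, k-1, …, 0] equals "stride[k] == expected" together with A's
-- neighbour chain over [k, k-1, …, 1].
lemma checkContiguousAltGo_key (stride view : List Int) (k : Nat) (p : Int) :
    checkContiguousAltGo stride view (PySem.List.pyRange (k : Int) (-1) (-1)) p =
      ((PySem.List.pyGetD stride (k : Int) 0 == p) &&
        (PySem.List.pyRange (k : Int) 0 (-1)).all (fun i =>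
          PySem.List.pyGetD stride (i - 1) 0 ==
            PySem.List.pyGetD stride i 0 * PySem.List.pyGetD view i 0)) := by
  induction k generalizing p with
  | zero =>
      rw [Nat.cast_zero, PySem.List.pyRange_neg_one_cons (by norm_num : (-1 : Int) < 0),
          PySem.List.pyRange_neg_one_eq_nil (by norm_num : (0 : Int) - 1 ≤ -1),
          PySem.List.pyRange_neg_one_eq_nil (le_refl (0 : Int))]
      simp [checkContiguousAltGo]
      by_cases h : PySem.List.pyGetD stride 0 0 = p <;> simp [h]
  | succ k ih =>
      have hcast : ((k + 1 : Nat) : Int) = (k : Int) + 1 := by push_cast; ring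
      rw [hcast,
          PySem.List.pyRange_neg_one_cons (by omega : (-1 : Int) < (k : Int) + 1),
          PySem.List.pyRange_neg_one_cons (by omega : (0 : Int) < (k : Int) + 1)]
      have h1 : (k : Int) + 1 - 1 = (k : Int) := by ring
      simp only [checkContiguousAltGo, h1, List.all_cons]
      by_cases h : PySem.List.pyGetD stride ((k : Int) + 1) 0 = p
      · have hpos : (0 : Int) < (k : Int) + 1 := by omega
        simp only [h, bne_self_eq_false, Bool.false_eq_true, if_false, if_pos hpos, ih]
        simp
      · simp [bne, beq_iff_eq, h]

lemma check_contiguous_eq (stride view : List Int) (hne : stride ≠ []) :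
    check_contiguous stride view = check_contiguous_alt stride view := by
  obtain ⟨n, hn⟩ : ∃ n : Nat, stride.length = n + 1 := by
    cases stride with
    | nil => exact absurd rfl hne
    | cons a l => exact ⟨l.length, rfl⟩
  have hlen : ((stride.length : Int) - 1) = ((n : Nat) : Int) := by
    rw [hn]; push_cast; ring
  unfold check_contiguous check_contiguous_alt
  rw [hlen, checkContiguousAltGo_key]
  have hneg : PySem.List.pyGetD stride (-1) 0 = PySem.List.pyGetD stride ((n : Nat) : Int) 0 := by
    rw [PySem.List.pyGetD_neg_one stride 0 hne]
    rw [PySem.List.pyGetD_natCast]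
    rw [List.getLast_eq_getElem]
    simp [List.getD, hn]
  rw [hneg]
  cases hA : (PySem.List.pyGetD stride ((n : Nat) : Int) 0 == 1) <;>
    cases hB : ((PySem.List.pyRange ((n : Nat) : Int) 0 (-1)).all fun i =>
      PySem.List.pyGetD stride (i - 1) 0 ==
        PySem.List.pyGetD stride i 0 * PySem.List.pyGetD view i 0) <;>
    simp [hA, hB]

-- ===== VERDICT (by name: the statement is the Claim_ definition above) =====
theorem check_contiguous_spec : Claim_equal_check_contiguous := by
  intro stride view _ hpre
  unfold Spec_check_contiguous
  exact check_contiguous_eq stride view hpre.1
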